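-- pv_equiv track=rewrite | github.com/dharahas10/Autoencoder | TrainNetwork.py | _iterate_mini_batch
-- ===== SOURCE A (Python) =====
-- def _iterate_mini_batch(data, batch_size):
--
--     indices = []
--     ratings = []
--     currCount = 0
--     for key, values in data.items():
--         if currCount < batch_size:
--             for value in values:
--                 indices.append([currCount, value[0]-1])
--                 ratings.append(value[1])
--             currCount = currCount+1
--         else:
--             yield (indices, ratings)
--
--             currCount = 0
--             indices = []
--             ratings = []
--
--             for value in values:
--                 indices.append([currCount, value[0]-1])
--                 ratings.append(value[1])
--             currCount = currCount+1
--
--     yield (indices, ratings)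
-- ===== SOURCE B (Python) =====
-- def _iterate_mini_batch(data, batch_size):
--     items = list(data.items())
--     if not items:
--         yield ([], [])
--         return
--     for start in range(0, len(items), batch_size):
--         indices = []
--         ratings = []
--         for pos, (key, values) in enumerate(items[start:start + batch_size]):
--             for value in values:
--                 indices.append([pos, value[0] - 1])
--                 ratings.append(value[1])
--         yield (indices, ratings)
-- ===== Notes on version B (the rewrite author's own statement) =====
-- stated objective: alternative
-- what changed: Replaces A's streaming pass with a running row counter, mutable batch buffers and a duplicated flush/refill else-branch by a group-then-reshape decomposition: materialize the items, slice them into chunks of batch_size via range(0, n, batch_size), and render each chunk independently with enumerate giving the within-batch row index.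
-- outside the precondition, e.g. on _iterate_mini_batch({1: [(1, 5)]}, 0): A returns [([], []), ([[0, 0]], [5])], B raises ValueError; on _iterate_mini_batch({1: [(1, 5)]}, -1): A returns [([], []), ([[0, 0]], [5])], B returns []
import Mathlib
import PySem

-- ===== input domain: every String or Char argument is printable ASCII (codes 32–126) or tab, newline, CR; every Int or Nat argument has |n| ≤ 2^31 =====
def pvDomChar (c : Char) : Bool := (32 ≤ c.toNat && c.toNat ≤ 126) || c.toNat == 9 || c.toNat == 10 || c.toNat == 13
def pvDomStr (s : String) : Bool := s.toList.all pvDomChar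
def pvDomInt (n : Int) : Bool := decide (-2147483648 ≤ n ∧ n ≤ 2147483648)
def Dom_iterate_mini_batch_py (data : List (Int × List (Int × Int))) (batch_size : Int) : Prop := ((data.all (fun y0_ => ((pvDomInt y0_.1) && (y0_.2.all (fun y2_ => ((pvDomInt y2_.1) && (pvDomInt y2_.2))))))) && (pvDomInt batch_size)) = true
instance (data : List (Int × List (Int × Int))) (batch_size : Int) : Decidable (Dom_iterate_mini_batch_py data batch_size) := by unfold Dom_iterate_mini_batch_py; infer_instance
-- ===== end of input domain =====

-- B replaces A's streaming counter pass (duplicated flush/refill branch) by a group-then-reshape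
-- decomposition: chunk the items by range(0, n, batch_size) and render each chunk with enumerate.
-- Objective: alternative (same cost, plainer structure). Equivalence proved on distinct-key data
-- with batch_size ≥ 1.


-- ===== PORT A =====
-- literal port of A: one pass over data.items() with a running counter, flushing a batch when
-- the counter reaches batch_size, then a final yield of the open batch
def iterate_mini_batch_py (data : List (Int × List (Int × Int))) (batch_size : Int) : List (List (List Int) × List Int) :=
  let st := data.foldl
    (fun (st : List (List (List Int) × List Int) × List (List Int) × List Int × Int)
         (kv : Int × List (Int × Int)) =>
      let out := st.1
      let indices := st.2.1
      let ratings := st.2.2.1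
      let currCount := st.2.2.2
      if currCount < batch_size then
        let p := kv.2.foldl (fun (p : List (List Int) × List Int) (v : Int × Int) =>
          (p.1 ++ [[currCount, v.1 - 1]], p.2 ++ [v.2])) (indices, ratings)
        (out, p.1, p.2, currCount + 1)
      else
        let out' := out ++ [(indices, ratings)]
        let currCount' : Int := 0
        let p := kv.2.foldl (fun (p : List (List Int) × List Int) (v : Int × Int) =>
          (p.1 ++ [[currCount', v.1 - 1]], p.2 ++ [v.2])) (([], []) : List (List Int) × List Int)
        (out', p.1, p.2, currCount' + 1))
    ([], [], [], 0)
  st.1 ++ [(st.2.1, st.2.2.1)]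

-- ===== PORT B =====
-- literal port of B: special-case empty data, else one batch per chunk start in
-- range(0, len(items), batch_size), rendering items[start:start+batch_size] with enumerate
def iterate_mini_batch_py_alt (data : List (Int × List (Int × Int))) (batch_size : Int) : List (List (List Int) × List Int) :=
  if data = [] then [([], [])]
  else
    (PySem.List.pyRange 0 (PySem.List.len data) batch_size).map (fun start =>
      (PySem.List.enumerate (PySem.List.slice data (some start) (some (start + batch_size))) 0).foldl
        (fun (p : List (List Int) × List Int) (pv : Int × (Int × List (Int × Int))) =>
          pv.2.2.foldl (fun (q : List (List Int) × List Int) (v : Int × Int) =>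
            (q.1 ++ [[pv.1, v.1 - 1]], q.2 ++ [v.2])) p)
        ([], []))

-- ===== PRECONDITION & SPEC =====
-- Pre_ restricts to the natural domain: batch_size ≥ 1 (for batch_size ≤ 0 A's value — a leading
-- empty batch then one batch per key — is a degenerate accident of the counter and B's range-based
-- chunking raises or yields nothing) and pairwise-distinct keys (data is a Python dict, which
-- cannot hold duplicate keys; a duplicate-key association list has no faithful dict counterpart).
def Pre_iterate_mini_batch_py (data : List (Int × List (Int × Int))) (batch_size : Int) : Prop :=
  1 ≤ batch_size ∧ data.Pairwise (fun a b => a.1 ≠ b.1)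
instance (data : List (Int × List (Int × Int))) (batch_size : Int) : Decidable (Pre_iterate_mini_batch_py data batch_size) := by unfold Pre_iterate_mini_batch_py; infer_instance

def pvWitness_iterate_mini_batch_py : (List (Int × List (Int × Int))) × Int :=
  ([(1, [(1, 5), (2, 4)]), (2, [(3, 1)]), (3, [])], 2)

def Spec_iterate_mini_batch_py (data : List (Int × List (Int × Int))) (batch_size : Int) (out : List (List (List Int) × List Int)) : Prop := out = iterate_mini_batch_py_alt data batch_size
instance (data : List (Int × List (Int × Int))) (batch_size : Int) (out : List (List (List Int) × List Int)) : Decidable (Spec_iterate_mini_batch_py data batch_size out) := by unfold Spec_iterate_mini_batch_py; infer_instance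

-- ===== CLAIM (what is proved, stated in full; the proofs are below) =====
def Claim_equal_iterate_mini_batch_py : Prop := ∀ (data : List (Int × List (Int × Int))) (batch_size : Int), Dom_iterate_mini_batch_py data batch_size → Pre_iterate_mini_batch_py data batch_size → Spec_iterate_mini_batch_py data batch_size (iterate_mini_batch_py data batch_size)

-- ===== LEMMAS AND PROOFS =====

-- appending the rows of one key's values, with row index cc (the shared inner loop of both programs)
def pvFill (cc : Int) (values : List (Int × Int)) (p : List (List Int) × List Int) :
    List (List Int) × List Int :=
  values.foldl (fun (q : List (List Int) × List Int) (v : Int × Int) =>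
    (q.1 ++ [[cc, v.1 - 1]], q.2 ++ [v.2])) p

-- B's per-chunk rendering, generalized over the enumerate start and accumulator
def pvEFold (s : Int) (l : List (Int × List (Int × Int))) (p : List (List Int) × List Int) :
    List (List Int) × List Int :=
  (PySem.List.enumerate l s).foldl
    (fun (p : List (List Int) × List Int) (pv : Int × (Int × List (Int × Int))) =>
      pvFill pv.1 pv.2.2 p) p

def pvRender (chunk : List (Int × List (Int × Int))) : List (List Int) × List Int :=
  pvEFold 0 chunk ([], [])

-- the common specification: chunks of bs keys, each rendered independently
def pvSpecR (bs : Nat) (data : List (Int × List (Int × Int))) : List (List (List Int) × List Int) :=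
  if bs = 0 then []
  else if h : data.drop bs = [] then [pvRender data]
  else pvRender (data.take bs) :: pvSpecR bs (data.drop bs)
termination_by data.length
decreasing_by
  simp only [List.length_drop]
  have : bs < data.length := by
    by_contra hc
    exact h (List.drop_eq_nil_of_le (by omega))
  omega

-- A's fold step and finalization, named for the proofs
def pvStepA (batch_size : Int)
    (st : List (List (List Int) × List Int) × List (List Int) × List Int × Int)
    (kv : Int × List (Int × Int)) :
    List (List (List Int) × List Int) × List (List Int) × List Int × Int :=
  if st.2.2.2 < batch_size then
    let p := pvFill st.2.2.2 kv.2 (st.2.1, st.2.2.1)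
    (st.1, p.1, p.2, st.2.2.2 + 1)
  else
    let p := pvFill 0 kv.2 ([], [])
    (st.1 ++ [(st.2.1, st.2.2.1)], p.1, p.2, 1)

def pvFin (st : List (List (List Int) × List Int) × List (List Int) × List Int × Int) :
    List (List (List Int) × List Int) :=
  st.1 ++ [(st.2.1, st.2.2.1)]

lemma pvEFold_cons (s : Int) (x : Int × List (Int × Int)) (l : List (Int × List (Int × Int))) (p) :
    pvEFold s (x :: l) p = pvEFold (s + 1) l (pvFill s x.2 p) := by
  simp [pvEFold, PySem.List.enumerate_cons]

lemma pvEFold_snoc (l : List (Int × List (Int × Int))) (x : Int × List (Int × Int)) :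
    ∀ (s : Int) (p), pvEFold s (l ++ [x]) p = pvFill (s + l.length) x.2 (pvEFold s l p) := by
  induction l with
  | nil => intro s p; simp [pvEFold]
  | cons y t ih =>
      intro s p
      rw [List.cons_append, pvEFold_cons, pvEFold_cons, ih]
      congr 1
      push_cast [List.length_cons]
      omega

lemma pvRender_snoc (l : List (Int × List (Int × Int))) (x : Int × List (Int × Int)) :
    pvRender (l ++ [x]) = pvFill (l.length : Int) x.2 (pvRender l) := by
  rw [pvRender, pvEFold_snoc, pvRender, zero_add]

lemma pvA_eq_fold (data : List (Int × List (Int × Int))) (batch_size : Int) :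
    iterate_mini_batch_py data batch_size =
      pvFin (data.foldl (pvStepA batch_size) ([], [], [], 0)) := rfl

-- the A-side invariant: from a state holding a partially filled chunk pre (with pre.length ≤ bs),
-- the rest of the pass produces exactly the chunk decomposition of pre ++ rest
lemma pvA_main (bs : Int) (hbs : 1 ≤ bs) :
    ∀ (rest pre : List (Int × List (Int × Int))) (out : List (List (List Int) × List Int)),
      (pre.length : Int) ≤ bs →
      pvFin (rest.foldl (pvStepA bs) (out, (pvRender pre).1, (pvRender pre).2, (pre.length : Int)))
        = out ++ pvSpecR bs.toNat (pre ++ rest) := by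
  intro rest
  induction rest with
  | nil =>
      intro pre out hle
      have hdrop : pre.drop bs.toNat = [] := List.drop_eq_nil_of_le (by omega)
      rw [List.append_nil, pvSpecR]
      simp [pvFin, hdrop, show ¬ bs.toNat = 0 by omega]
  | cons kv rs ih =>
      intro pre out hle
      rcases lt_or_eq_of_le hle with hlt | heq
      · -- counter below batch_size: fill into the open chunk
        have hstep : pvStepA bs (out, (pvRender pre).1, (pvRender pre).2, (pre.length : Int)) kv
            = (out, (pvRender (pre ++ [kv])).1, (pvRender (pre ++ [kv])).2,
               ((pre ++ [kv]).length : Int)) := by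
          simp [pvStepA, hlt, pvRender_snoc]
        rw [List.foldl_cons, hstep, ih (pre ++ [kv]) out (by simp; omega)]
        simp
      · -- counter full: flush the chunk and start a new one with kv
        have hstep : pvStepA bs (out, (pvRender pre).1, (pvRender pre).2, (pre.length : Int)) kv
            = (out ++ [pvRender pre], (pvRender [kv]).1, (pvRender [kv]).2,
               (([kv] : List (Int × List (Int × Int))).length : Int)) := by
          simp [pvStepA, heq, pvRender, pvEFold]
        rw [List.foldl_cons, hstep, ih [kv] (out ++ [pvRender pre]) (by simp; omega)]
        have hlen : pre.length = bs.toNat := by omega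
        have hdrop : (pre ++ kv :: rs).drop bs.toNat = kv :: rs := by
          rw [← hlen, List.drop_left]
        have htake : (pre ++ kv :: rs).take bs.toNat = pre := by
          rw [← hlen, List.take_left]
        conv_rhs => rw [pvSpecR]
        simp [hdrop, htake, show ¬ bs.toNat = 0 by omega]

-- pyRange with a positive step, decomposed as head + shifted tail
lemma pvRange_cons (s b : Int) (hs : 0 < s) (hb : 0 < b) :
    PySem.List.pyRange 0 b s = 0 :: (PySem.List.pyRange 0 (b - s) s).map (· + s) := by
  rw [PySem.List.pyRange_of_pos _ _ hs, PySem.List.pyRange_of_pos _ _ hs]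
  have e1 : b - 0 + s - 1 = b + s - 1 := by ring
  have e2 : b - s - 0 + s - 1 = b - 1 := by ring
  rw [if_pos (show (0:Int) < b by omega), e1]
  by_cases hbs2 : b ≤ s
  · rw [if_neg (show ¬ (0:Int) < b - s by omega)]
    have h1 : (b + s - 1) / s = 1 := by
      rw [← PySem.Int.floordiv_eq_ediv_of_pos hs, PySem.Int.floordiv_eq_iff_of_pos hs]
      omega
    simp [h1, List.range_succ]
  · rw [if_pos (show (0:Int) < b - s by omega), e2]
    have h1 : (b + s - 1) / s = (b - 1) / s + 1 := by
      have e3 : b + s - 1 = (b - 1) + 1 * s := by ring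
      rw [e3, Int.add_mul_ediv_right _ _ (by omega)]
    have h2 : (0:Int) ≤ (b - 1) / s := Int.ediv_nonneg (by omega) (by omega)
    have h4 : ((b + s - 1) / s).toNat = ((b - 1) / s).toNat + 1 := by omega
    rw [h4, List.range_succ_eq_map, List.map_cons, List.map_map, List.map_map]
    refine List.cons_eq_cons.mpr ⟨by norm_num, ?_⟩
    apply List.map_congr_left
    intro a _
    simp [Nat.succ_eq_add_one]
    push_cast
    ring

-- B's port on nonempty data, in terms of pvRender
lemma pvAlt_eq (data : List (Int × List (Int × Int))) (bs : Int) (hd : data ≠ []) :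
    iterate_mini_batch_py_alt data bs
      = (PySem.List.pyRange 0 (PySem.List.len data) bs).map
          (fun s => pvRender (PySem.List.slice data (some s) (some (s + bs)))) := by
  rw [iterate_mini_batch_py_alt, if_neg hd]
  rfl

lemma pvRange_nil (s b : Int) (hs : 0 < s) (hb : b ≤ 0) :
    PySem.List.pyRange 0 b s = [] := by
  rw [PySem.List.pyRange_of_pos _ _ hs, if_neg (show ¬ (0:Int) < b by omega)]
  simp

-- B's port equals the chunk decomposition
lemma pvB_main (bs : Int) (hbs : 1 ≤ bs) :
    ∀ (data : List (Int × List (Int × Int))),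
      iterate_mini_batch_py_alt data bs = pvSpecR bs.toNat data := by
  intro data
  induction hn : data.length using Nat.strong_induction_on generalizing data with
  | _ n ih =>
  rcases eq_or_ne data [] with hd | hd
  · subst hd
    rw [pvSpecR]
    simp [iterate_mini_batch_py_alt, pvRender, pvEFold, PySem.List.enumerate,
      show ¬ bs.toNat = 0 by omega]
  · have hlen : 0 < data.length := List.length_pos_of_ne_nil hd
    rw [pvAlt_eq data bs hd,
        pvRange_cons bs (PySem.List.len data) (by omega) (by simp; omega),
        List.map_cons, List.map_map]
    have hhead : pvRender (PySem.List.slice data (some 0) (some (0 + bs)))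
        = pvRender (data.take bs.toNat) := by
      rw [zero_add, PySem.List.slice_toNat data (le_refl 0) (by omega)]
      simp
    by_cases h2 : data.drop bs.toNat = []
    · -- a single chunk: the shifted range is empty
      have hble : data.length ≤ bs.toNat := by
        have := List.drop_eq_nil_iff.mp h2
        omega
      have hr0 : PySem.List.pyRange 0 (PySem.List.len data - bs) bs = [] := by
        apply pvRange_nil bs _ (by omega)
        simp
        omega
      rw [pvSpecR, if_neg (show ¬ bs.toNat = 0 by omega), dif_pos h2, hr0]
      simp only [List.map_nil]
      rw [hhead, List.take_of_length_le hble]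
    · -- head chunk plus the decomposition of the remaining keys
      have hblt : bs.toNat < data.length := by
        by_contra hc
        exact h2 (List.drop_eq_nil_iff.mpr (by omega))
      have hrec := ih (data.drop bs.toNat).length (by simp; omega) (data.drop bs.toNat) rfl
      rw [pvAlt_eq _ bs h2] at hrec
      conv_rhs => rw [pvSpecR]
      rw [if_neg (show ¬ bs.toNat = 0 by omega), dif_neg h2, ← hrec, hhead]
      congr 1
      have hlend : PySem.List.len (data.drop bs.toNat) = PySem.List.len data - bs := by
        simp
        omega
      rw [hlend]
      apply List.map_congr_left
      intro x hx
      have hx0 : 0 ≤ x := ((PySem.List.mem_pyRange_iff_of_pos (by omega) x).mp hx).1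
      simp only [Function.comp]
      congr 1
      rw [PySem.List.slice_toNat data (by omega) (by omega),
          PySem.List.slice_toNat (data.drop bs.toNat) (by omega) (by omega),
          List.drop_drop]
      have hA : (x + bs + bs).toNat - (x + bs).toNat = (x + bs).toNat - x.toNat := by omega
      have hB : (x + bs).toNat = x.toNat + bs.toNat := by omega
      rw [hA, hB, Nat.add_comm x.toNat bs.toNat]

-- ===== VERDICT (by name: the statement is the Claim_ definition above) =====
theorem iterate_mini_batch_py_spec : Claim_equal_iterate_mini_batch_py := by
  intro data bs _ hpre
  obtain ⟨hbs, -⟩ := hpre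
  unfold Spec_iterate_mini_batch_py
  rw [pvB_main bs hbs data]
  have := pvA_main bs hbs data [] []
  simp only [List.length_nil, Int.natCast_zero, List.nil_append] at this
  rw [pvA_eq_fold]
  exact this (by omega)
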